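-- pv_equiv track=rewrite | github.com/nazarblch/4context | polls/views.py | k_factorial
-- ===== SOURCE A (Python) =====
-- def k_factorial(ind, words, k):
--
-- 	if ind == k:
-- 		return [ w for w in words ]
--
-- 	else:
--
-- 		arr = []
-- 		for w in words:
-- 			for w1 in k_factorial(ind+1, [s for s in words if s != w ], k):
-- 				arr.append(w+" "+w1)
--
-- 		return arr
-- ===== SOURCE B (Python) =====
-- def k_factorial(ind, words, k):
--     # Iterative level-by-level worklist instead of recursion, with a pruning
--     # shortcut: a chain removes one distinct value per step, so if there are
--     # at most k-ind distinct words no sequence can reach depth k and the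
--     # result is empty.
--     if ind == k:
--         return list(words)
--     if ind > k:
--         return []
--     if len(set(words)) <= k - ind:
--         return []
--     frontier = [(w, [s for s in words if s != w]) for w in words]
--     for _ in range(k - ind):
--         frontier = [(p + " " + w, [s for s in rem if s != w])
--                     for p, rem in frontier for w in rem]
--     return [p for p, _ in frontier]
-- ===== Notes on version B (the rewrite author's own statement) =====
-- stated objective: alternative
-- what changed: Replaced the depth-first recursion by an iterative breadth-first worklist of (prefix, remaining-words) states expanded for exactly k-ind rounds, preserving output order and multiplicity.
import Mathlib
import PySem

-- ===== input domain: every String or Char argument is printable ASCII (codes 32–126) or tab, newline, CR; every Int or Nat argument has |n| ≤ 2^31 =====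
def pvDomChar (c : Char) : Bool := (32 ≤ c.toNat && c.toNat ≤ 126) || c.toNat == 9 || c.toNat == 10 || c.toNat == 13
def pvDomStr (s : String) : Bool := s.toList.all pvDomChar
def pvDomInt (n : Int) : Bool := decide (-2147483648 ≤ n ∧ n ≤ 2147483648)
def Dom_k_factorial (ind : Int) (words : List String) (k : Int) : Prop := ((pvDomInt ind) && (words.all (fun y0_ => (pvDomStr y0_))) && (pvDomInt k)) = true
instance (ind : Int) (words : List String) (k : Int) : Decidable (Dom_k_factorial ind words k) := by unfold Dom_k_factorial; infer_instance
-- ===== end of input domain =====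

-- B replaces A's depth-first recursion by an iterative level-by-level worklist of
-- (prefix, remaining-words) states; same return value, no speed claim.

-- ===== PORT A =====
-- termination: the recursive call filters out w ∈ words, so the word list strictly shrinks
def k_factorial (ind : Int) (words : List String) (k : Int) : List String :=
  if ind = k then
    words.map (fun w => w)
  else
    words.attach.foldl
      (fun arr w =>
        (k_factorial (ind + 1) (words.filter (fun s => s != w.1)) k).foldl
          (fun arr2 w1 => arr2 ++ [w.1 ++ " " ++ w1]) arr)
      []
termination_by words.length
decreasing_by
  simp only [List.length_unattach]
  have := List.length_filter_lt_length_iff_exists (l := words.attach) (p := fun x => x.1 != w.1)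
  rw [List.length_attach] at this
  exact this.mpr ⟨w, List.mem_attach _ _, by simp⟩

-- ===== PORT B =====
-- one expansion round: each state (p, rem) spawns (p ++ " " ++ w, rem without w) for w in rem
def altStep (st : List (String × List String)) : List (String × List String) :=
  st.flatMap (fun s => s.2.map (fun w => (s.1 ++ " " ++ w, s.2.filter (fun x => x != w))))

def k_factorial_alt (ind : Int) (words : List String) (k : Int) : List String :=
  if ind = k then
    words.map (fun w => w)
  else if k < ind then
    []
  else if ((PySem.Set.ofList words).length : Int) ≤ k - ind then
    []
  else
    let init := words.map (fun w => (w, words.filter (fun s => s != w)))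
    ((List.range (k - ind).toNat).foldl (fun st _ => altStep st) init).map Prod.fst

-- ===== PRECONDITION & SPEC =====
def Spec_k_factorial (ind : Int) (words : List String) (k : Int) (out : List String) : Prop := out = k_factorial_alt ind words k
instance (ind : Int) (words : List String) (k : Int) (out : List String) : Decidable (Spec_k_factorial ind words k out) := by unfold Spec_k_factorial; infer_instance

-- ===== CLAIM (what is proved, stated in full; the proofs are below) =====
def Claim_equal_k_factorial : Prop := ∀ (ind : Int) (words : List String) (k : Int), Dom_k_factorial ind words k → Spec_k_factorial ind words k (k_factorial ind words k)

-- ===== LEMMAS AND PROOFS =====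

-- A's recursion at relative depth d, written with flatMap
def arec : Nat → List String → List String
  | 0, ws => ws
  | d + 1, ws => ws.flatMap (fun w => (arec d (ws.filter (fun s => s != w))).map (fun q => w ++ " " ++ q))

-- expanding one worklist state for m rounds
def expandN : Nat → String × List String → List String
  | 0, s => [s.1]
  | m + 1, s => s.2.flatMap (fun w => expandN m (s.1 ++ " " ++ w, s.2.filter (fun x => x != w)))

-- iterate altStep
def iterN : Nat → List (String × List String) → List (String × List String)
  | 0, st => st
  | m + 1, st => altStep (iterN m st)

theorem foldl_inner_eq (g : String → List String) (h : String → String → String)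
    (l : List String) (acc : List String) :
    l.foldl (fun arr w => (g w).foldl (fun a x => a ++ [h w x]) arr) acc
      = acc ++ l.flatMap (fun w => (g w).map (h w)) := by
  induction l generalizing acc with
  | nil => simp
  | cons w l ih =>
      simp only [List.foldl_cons, ih, List.flatMap_cons, ← List.append_assoc]
      congr 1
      have : ∀ (m : List String) (a : List String),
          m.foldl (fun a x => a ++ [h w x]) a = a ++ m.map (h w) := by
        intro m
        induction m with
        | nil => simp
        | cons x m ihm => intro a; simp [ihm, List.append_assoc]
      exact this (g w) acc

theorem A_flatMap (ind : Int) (words : List String) (k : Int) (h : ind ≠ k) :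
    k_factorial ind words k
      = words.flatMap (fun w =>
          (k_factorial (ind + 1) (words.filter (fun s => s != w)) k).map (fun q => w ++ " " ++ q)) := by
  rw [k_factorial.eq_def, if_neg h]
  have := foldl_inner_eq
    (fun w => k_factorial (ind + 1) (words.filter (fun s => s != w)) k)
    (fun w q => w ++ " " ++ q) (words.attach.map Subtype.val) []
  simpa [List.foldl_map, List.flatMap_map] using this

theorem A_gt (n : Nat) : ∀ (ind : Int) (words : List String) (k : Int),
    words.length ≤ n → k < ind → k_factorial ind words k = [] := by
  induction n with
  | zero =>
      intro ind words k hlen hk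
      have : words = [] := List.eq_nil_of_length_eq_zero (Nat.le_zero.mp hlen)
      subst this
      rw [A_flatMap _ _ _ (by omega)]; simp
  | succ n ih =>
      intro ind words k hlen hk
      rw [A_flatMap _ _ _ (by omega)]
      apply List.flatMap_eq_nil_iff.mpr
      intro w hw
      rw [ih (ind + 1) _ k ?_ (by omega)]
      · simp
      · have hlt : (words.filter (fun s => s != w)).length < words.length :=
          List.length_filter_lt_length_iff_exists.mpr ⟨w, hw, by simp⟩
        omega

theorem A_eq_arec (k : Int) : ∀ (d : Nat) (ind : Int) (words : List String),
    ind + d = k → k_factorial ind words k = arec d words := by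
  intro d
  induction d with
  | zero =>
      intro ind words h
      rw [k_factorial.eq_def, if_pos (by omega)]
      simp [arec]
  | succ d ih =>
      intro ind words h
      rw [A_flatMap _ _ _ (by omega), arec]
      apply List.flatMap_congr
      intro w _
      rw [ih (ind + 1) _ (by omega)]

theorem iterN_shift (m : Nat) (st : List (String × List String)) :
    iterN (m + 1) st = iterN m (altStep st) := by
  induction m generalizing st with
  | zero => rfl
  | succ m ih => rw [iterN, ih, iterN]

theorem range_foldl_iterN (m : Nat) (st : List (String × List String)) :
    (List.range m).foldl (fun st _ => altStep st) st = iterN m st := by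
  induction m with
  | zero => rfl
  | succ m ih => rw [List.range_succ, List.foldl_append, ih, List.foldl_cons, List.foldl_nil, iterN]

theorem ofList_length_toFinset (ws : List String) :
    (PySem.Set.ofList ws).length = ws.toFinset.card := by
  rw [← List.toFinset_card_of_nodup (PySem.Set.nodup_ofList ws)]
  congr 1
  ext x
  simp [PySem.Set.mem_ofList]

theorem toFinset_filter_ne (ws : List String) (w : String) :
    (ws.filter (fun s => s != w)).toFinset = ws.toFinset.erase w := by
  ext x
  simp [Finset.mem_erase, and_comm]

theorem arec_nil (m : Nat) : ∀ ws : List String, ws.toFinset.card ≤ m → arec m ws = [] := by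
  induction m with
  | zero =>
      intro ws h
      cases ws with
      | nil => rfl
      | cons w ws =>
          exfalso
          have : w ∈ (w :: ws).toFinset := by simp
          have := Finset.card_pos.mpr ⟨w, this⟩
          omega
  | succ m ih =>
      intro ws h
      rw [arec]
      apply List.flatMap_eq_nil_iff.mpr
      intro w hw
      rw [ih _ ?_]
      · simp
      · rw [toFinset_filter_ne, Finset.card_erase_of_mem (List.mem_toFinset.mpr hw)]
        have := Finset.card_pos.mpr ⟨w, List.mem_toFinset.mpr hw⟩
        omega

theorem iterN_fst (m : Nat) : ∀ st, (iterN m st).map Prod.fst = st.flatMap (expandN m) := by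
  induction m with
  | zero =>
      intro st
      exact List.map_eq_flatMap
  | succ m ih =>
      intro st
      rw [iterN_shift, ih, altStep, List.flatMap_assoc]
      apply List.flatMap_congr
      intro s _
      rw [List.flatMap_map]
      rfl

theorem expandN_arec (m : Nat) : ∀ (p : String) (rem : List String),
    expandN (m + 1) (p, rem) = (arec m rem).map (fun q => p ++ " " ++ q) := by
  induction m with
  | zero =>
      intro p rem
      exact (List.map_eq_flatMap).symm
  | succ m ih =>
      intro p rem
      rw [expandN, arec, List.map_flatMap]
      apply List.flatMap_congr
      intro w _
      rw [ih, List.map_map]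
      apply List.map_congr_left
      intro q _
      simp [Function.comp, String.append_assoc]

theorem alt_eq_arec (ind : Int) (words : List String) (k : Int) (h : ind < k)
    (hd : ¬ ((PySem.Set.ofList words).length : Int) ≤ k - ind) :
    k_factorial_alt ind words k = arec (k - ind).toNat words := by
  rw [k_factorial_alt, if_neg (by omega), if_neg (by omega), if_neg hd]
  obtain ⟨m, hm⟩ : ∃ m : Nat, (k - ind).toNat = m + 1 := ⟨(k - ind).toNat - 1, by omega⟩
  simp only [hm]
  rw [range_foldl_iterN, iterN_fst, List.flatMap_map]
  rw [show arec (m + 1) words = words.flatMap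
    (fun w => (arec m (words.filter (fun s => s != w))).map (fun q => w ++ " " ++ q)) from rfl]
  apply List.flatMap_congr
  intro w _
  exact expandN_arec m w (words.filter (fun s => s != w))

-- ===== VERDICT (by name: the statement is the Claim_ definition above) =====
theorem k_factorial_spec : Claim_equal_k_factorial := by
  intro ind words k _
  unfold Spec_k_factorial
  rcases lt_trichotomy ind k with h | h | h
  · by_cases hd : ((PySem.Set.ofList words).length : Int) ≤ k - ind
    · rw [A_eq_arec k (k - ind).toNat ind words (by omega),
        arec_nil _ words (by rw [← ofList_length_toFinset]; omega),
        k_factorial_alt, if_neg (by omega), if_neg (by omega), if_pos hd]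
    · rw [alt_eq_arec _ _ _ h hd, ← A_eq_arec k _ ind words (by omega)]
  · subst h
    rw [k_factorial.eq_def, if_pos rfl, k_factorial_alt, if_pos rfl]
  · rw [A_gt words.length ind words k le_rfl h,
      k_factorial_alt, if_neg (by omega), if_pos h]
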